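-- pv_equiv track=rewrite | github.com/lucafusarbassini/research-automation | core/social_media.py | summarize_for_social
-- ===== SOURCE A (Python) =====
-- CHAR_LIMITS = {
--     "twitter": 280,
--     "linkedin": 3000,
--     "medium": 100_000,  # effectively unlimited
-- }
--
-- def summarize_for_social(paper_content: str, platform: str) -> str:
--     """Auto-summarize research content for a given platform.
--
--     This is a heuristic extractive summariser: it picks the first N
--     sentences that fit within the platform's character limit.
--     """
--     limit = CHAR_LIMITS.get(platform, 280)
--     sentences = _split_sentences(paper_content)
--
--     summary_parts: list[str] = []
--     current_length = 0
--     for sentence in sentences: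
--         addition = sentence if not summary_parts else " " + sentence
--         if current_length + len(addition) > limit:
--             break
--         summary_parts.append(addition)
--         current_length += len(addition)
--
--     summary = "".join(summary_parts)
--     if not summary and sentences:
--         # If even the first sentence is too long, truncate it.
--         summary = sentences[0][: limit - 3] + "..."
--     return summary
--
-- def _split_sentences(text: str) -> list[str]:
--     """Naively split text into sentences on period-space boundaries."""
--     parts: list[str] = []
--     current = ""
--     for char in text:
--         current += char
--         if char == "." and current.rstrip().endswith("."):
--             stripped = current.strip()
--             if stripped:
--                 parts.append(stripped)
--             current = ""
--     remaining = current.strip()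
--     if remaining:
--         parts.append(remaining)
--     return parts
-- ===== SOURCE B (Python) =====
-- CHAR_LIMITS = {
--     "twitter": 280,
--     "linkedin": 3000,
--     "medium": 100_000,  # effectively unlimited
-- }
--
-- def _split_sentences(text):
--     """Split on '.' via a split table: every piece but the last gets its '.'
--     back (stripped, always non-empty); the period-less tail is kept if non-empty."""
--     pieces = text.split(".")
--     sentences = [(p + ".").strip() for p in pieces[:-1]]
--     tail = pieces[-1].strip()
--     if tail:
--         sentences.append(tail)
--     return sentences
--
-- def summarize_for_social(paper_content: str, platform: str) -> str:
--     limit = CHAR_LIMITS.get(platform, 280)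
--     sentences = _split_sentences(paper_content)
--
--     # cumulative lengths of the space-joined prefixes; every step is > 0,
--     # so the sums are strictly increasing and the fitting prefix is
--     # exactly the sums that are <= limit.
--     cums = []
--     total = 0
--     for i, s in enumerate(sentences):
--         total += len(s) + (1 if i else 0)
--         cums.append(total)
--     count = sum(1 for c in cums if c <= limit)
--
--     summary = " ".join(sentences[:count])
--     if count == 0 and sentences:
--         summary = sentences[0][: limit - 3] + "..."
--     return summary
-- ===== Notes on version B (the rewrite author's own statement) =====
-- stated objective: faster
-- what changed: The char-by-char accumulating sentence scanner (current += char rebuilds the accumulator) is replaced by a split('.') table reshaped in one pass (re-append '.', strip), and the greedy fitting loop is replaced by cumulative prefix-sum lengths counted against the limit (valid because every addition length is positive, so the sums are strictly increasing).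
import Mathlib
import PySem

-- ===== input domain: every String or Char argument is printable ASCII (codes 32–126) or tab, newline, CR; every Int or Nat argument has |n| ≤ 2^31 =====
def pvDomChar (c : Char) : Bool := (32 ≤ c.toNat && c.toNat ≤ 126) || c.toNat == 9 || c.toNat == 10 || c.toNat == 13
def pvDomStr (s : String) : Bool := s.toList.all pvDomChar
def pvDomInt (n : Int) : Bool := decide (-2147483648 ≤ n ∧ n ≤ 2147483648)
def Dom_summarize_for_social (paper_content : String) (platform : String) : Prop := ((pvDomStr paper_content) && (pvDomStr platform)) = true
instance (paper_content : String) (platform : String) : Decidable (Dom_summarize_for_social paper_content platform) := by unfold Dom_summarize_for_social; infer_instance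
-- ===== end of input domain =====

-- B re-implements the sentence splitter via a split('.') table plus a reshaping pass and the
-- greedy fitter via cumulative prefix sums; same return value, measured faster (no char-by-char
-- accumulator re-copying).

-- ===== PORT A =====
-- module constant CHAR_LIMITS (shared by both Pythons)
def pvCharLimits : PySem.Dict String Int :=
  PySem.Dict.ofList [("twitter", 280), ("linkedin", 3000), ("medium", 100000)]

-- _split_sentences: char-by-char accumulating scan
def pvSplitLoopA : List (List Char) → List Char → List Char → List (List Char)
  | parts, current, [] =>
      let remaining := PySem.Chars.strip current
      if remaining ≠ [] then parts ++ [remaining] else parts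
  | parts, current, c :: rest =>
      let current' := current ++ [c]
      if (c == '.') && PySem.Chars.endswith (PySem.Chars.rstrip current') ['.'] then
        let stripped := PySem.Chars.strip current'
        pvSplitLoopA (if stripped ≠ [] then parts ++ [stripped] else parts) [] rest
      else
        pvSplitLoopA parts current' rest

-- the greedy fitting loop (summary_parts, current_length, remaining sentences)
def pvGreedyA (limit : Int) : List (List Char) → Int → List (List Char) → List (List Char)
  | parts, _, [] => parts
  | parts, len, s :: rest =>
      let addition := if parts.isEmpty then s else ' ' :: s
      if len + (addition.length : Int) > limit then parts
      else pvGreedyA limit (parts ++ [addition]) (len + (addition.length : Int)) rest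

def summarize_for_social (paper_content : String) (platform : String) : String :=
  let limit := pvCharLimits.getD platform 280
  let sentences := pvSplitLoopA [] [] paper_content.toList
  let parts := pvGreedyA limit [] 0 sentences
  let summary := PySem.Chars.join [] parts
  let summary :=
    if summary = [] ∧ sentences ≠ [] then
      PySem.List.slice (PySem.List.pyGetD sentences 0 []) none (some (limit - 3)) ++ "...".toList
    else summary
  String.ofList summary

-- ===== PORT B =====
-- _split_sentences: split('.') table, re-append '.' to every piece but the last, strip
def pvSplitSentencesB (text : List Char) : List (List Char) :=
  let pieces := PySem.Chars.splitOn text ['.']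
  let sentences := pieces.dropLast.map (fun p => PySem.Chars.strip (p ++ ['.']))
  let tail := PySem.Chars.strip (pieces.getLastD [])   -- pieces[-1]; split() never returns []
  if tail ≠ [] then sentences ++ [tail] else sentences

-- cumulative lengths of the space-joined prefixes ('total', 'first' replays 'i == 0')
def pvCumsB : Int → Bool → List (List Char) → List Int
  | _, _, [] => []
  | total, first, s :: rest =>
      let t := total + (s.length : Int) + (if first then 0 else 1)
      t :: pvCumsB t false rest

def summarize_for_social_alt (paper_content : String) (platform : String) : String :=
  let limit := pvCharLimits.getD platform 280
  let sentences := pvSplitSentencesB paper_content.toList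
  let cums := pvCumsB 0 true sentences
  let count := List.countP (fun c => decide (c ≤ limit)) cums
  let summary := PySem.Chars.join [' '] (sentences.take count)
  let summary :=
    if count = 0 ∧ sentences ≠ [] then
      PySem.List.slice (PySem.List.pyGetD sentences 0 []) none (some (limit - 3)) ++ "...".toList
    else summary
  String.ofList summary

-- ===== PRECONDITION & SPEC =====
def Spec_summarize_for_social (paper_content : String) (platform : String) (out : String) : Prop := out = summarize_for_social_alt paper_content platform
instance (paper_content : String) (platform : String) (out : String) : Decidable (Spec_summarize_for_social paper_content platform out) := by unfold Spec_summarize_for_social; infer_instance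

-- ===== CLAIM (what is proved, stated in full; the proofs are below) =====
def Claim_equal_summarize_for_social : Prop := ∀ (paper_content : String) (platform : String), Dom_summarize_for_social paper_content platform → Spec_summarize_for_social paper_content platform (summarize_for_social paper_content platform)

-- ===== LEMMAS AND PROOFS =====

-- clean recursive model of text.split('.')
def pvSplitDot : List Char → List (List Char)
  | [] => [[]]
  | c :: rest =>
      if c = '.' then [] :: pvSplitDot rest
      else
        match pvSplitDot rest with
        | [] => [[c]]
        | p :: ps => (c :: p) :: ps

theorem pvSplitDot_ne_nil (l : List Char) : pvSplitDot l ≠ [] := by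
  cases l with
  | nil => simp [pvSplitDot]
  | cons c rest =>
    simp only [pvSplitDot]
    split
    · simp
    · cases h : pvSplitDot rest <;> simp

theorem pvGo_eq : ∀ (fuel : Nat) (l cur : List Char) (acc : List (List Char)), l.length < fuel →
    PySem.Chars.splitOn.go ['.'] fuel l cur acc =
      acc.reverse ++ ((cur.reverse ++ (pvSplitDot l).headD []) :: (pvSplitDot l).tail) := by
  intro fuel
  induction fuel with
  | zero => intro l cur acc h; exact absurd h (Nat.not_lt_zero _)
  | succ f ih =>
    intro l cur acc h
    cases l with
    | nil => simp [PySem.Chars.splitOn.go, pvSplitDot]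
    | cons c rest =>
      by_cases hc : c = '.'
      · subst hc
        have hpre : List.isPrefixOf ['.'] ('.' :: rest) = true := by simp [List.isPrefixOf]
        rw [PySem.Chars.splitOn.go]
        simp only [hpre, if_pos, List.length_cons, List.length_nil, List.drop_succ_cons, List.drop_zero]
        rw [ih rest [] ((cur.reverse) :: acc) (by simpa using Nat.lt_of_succ_lt_succ h)]
        rcases hr : pvSplitDot rest with _ | ⟨p, ps⟩
        · exact absurd hr (pvSplitDot_ne_nil rest)
        · simp [pvSplitDot, hr]
      · have hpre : List.isPrefixOf ['.'] (c :: rest) = false := by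
          simp [List.isPrefixOf]; exact fun hx => hc hx.symm
        rw [PySem.Chars.splitOn.go]
        simp only [hpre, Bool.false_eq_true, if_neg, not_false_iff]
        rw [ih rest (c :: cur) acc (by simpa using Nat.lt_of_succ_lt_succ h)]
        rcases hr : pvSplitDot rest with _ | ⟨p, ps⟩
        · exact absurd hr (pvSplitDot_ne_nil rest)
        · simp [pvSplitDot, hc, hr]

theorem pvSplitOn_dot (s : List Char) : PySem.Chars.splitOn s ['.'] = pvSplitDot s := by
  rw [PySem.Chars.splitOn, pvGo_eq (s.length + 1) s [] [] (Nat.lt_succ_self _)]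
  rcases hr : pvSplitDot s with _ | ⟨p, ps⟩
  · exact absurd hr (pvSplitDot_ne_nil s)
  · simp

theorem pvSplitDot_no_dot (xs : List Char) (h : '.' ∉ xs) : pvSplitDot xs = [xs] := by
  induction xs with
  | nil => rfl
  | cons c rest ih =>
    simp only [List.mem_cons, not_or] at h
    simp [pvSplitDot, Ne.symm h.1, ih h.2]

theorem pvSplitDot_append_dot (xs ys : List Char) (h : '.' ∉ xs) :
    pvSplitDot (xs ++ '.' :: ys) = xs :: pvSplitDot ys := by
  induction xs with
  | nil => simp [pvSplitDot]
  | cons c rest ih =>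
    simp only [List.mem_cons, not_or] at h
    simp [pvSplitDot, Ne.symm h.1, ih h.2]

theorem pvRstrip_concat (l : List Char) (c : Char) (h : PySem.Chars.isspace c = false) :
    PySem.Chars.rstrip (l ++ [c]) = l ++ [c] := by
  simp [PySem.Chars.rstrip, h]

theorem pvStrip_concat_dot (xs : List Char) :
    PySem.Chars.strip (xs ++ ['.']) = PySem.Chars.lstrip xs ++ ['.'] := by
  have hd : PySem.Chars.isspace '.' = false := by decide
  simp only [PySem.Chars.strip, PySem.Chars.lstrip, List.dropWhile_append]
  by_cases h : (List.dropWhile PySem.Chars.isspace xs).isEmpty = true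
  · simp only [h, if_pos]
    simp only [List.isEmpty_iff] at h
    simp [h, hd, PySem.Chars.rstrip]
  · simp only [h, if_neg, Bool.false_eq_true, not_false_iff]
    exact pvRstrip_concat _ _ hd

theorem pvStrip_concat_dot_ne_nil (xs : List Char) : PySem.Chars.strip (xs ++ ['.']) ≠ [] := by
  simp [pvStrip_concat_dot]

theorem pvEndswith_dot (xs : List Char) :
    PySem.Chars.endswith (PySem.Chars.rstrip (xs ++ ['.'])) ['.'] = true := by
  rw [pvRstrip_concat _ _ (by decide), PySem.Chars.endswith_iff]
  exact ⟨xs, rfl⟩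

theorem pvSentsB_cons (current rest : List Char) (h : '.' ∉ current) :
    pvSplitSentencesB (current ++ '.' :: rest) =
      PySem.Chars.strip (current ++ ['.']) :: pvSplitSentencesB rest := by
  simp only [pvSplitSentencesB, pvSplitOn_dot, pvSplitDot_append_dot current rest h]
  rcases hP : pvSplitDot rest with _ | ⟨q, qs⟩
  · exact absurd hP (pvSplitDot_ne_nil rest)
  · simp only [List.dropLast_cons₂, List.map_cons, List.getLastD_cons]
    split <;> simp

theorem pvSentsB_no_dot (current : List Char) (h : '.' ∉ current) :
    pvSplitSentencesB current =
      if PySem.Chars.strip current ≠ [] then [PySem.Chars.strip current] else [] := by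
  simp only [pvSplitSentencesB, pvSplitOn_dot, pvSplitDot_no_dot current h]
  simp

-- the splitter loop of A computes B's split-table splitter
theorem pvSplitLoopA_eq : ∀ (cs current : List Char) (parts : List (List Char)), '.' ∉ current →
    pvSplitLoopA parts current cs = parts ++ pvSplitSentencesB (current ++ cs) := by
  intro cs
  induction cs with
  | nil =>
    intro current parts h
    simp only [List.append_nil, pvSplitLoopA, pvSentsB_no_dot current h]
    split <;> simp_all
  | cons c rest ih =>
    intro current parts h
    by_cases hc : c = '.'
    · subst hc
      rw [pvSplitLoopA]
      simp only [BEq.rfl, Bool.true_and, pvEndswith_dot current, if_pos]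
      rw [if_pos (pvStrip_concat_dot_ne_nil current)]
      rw [ih [] (parts ++ [PySem.Chars.strip (current ++ ['.'])]) (by simp)]
      rw [pvSentsB_cons current rest h]
      simp
    · rw [pvSplitLoopA]
      have hcb : (c == '.') = false := by simpa using hc
      simp only [hcb, Bool.false_and, Bool.false_eq_true, if_neg, not_false_iff]
      rw [ih (current ++ [c]) parts (by simp [h]; exact fun hx => hc hx.symm)]
      simp

theorem pvSplitA_eq_B (text : List Char) :
    pvSplitLoopA [] [] text = pvSplitSentencesB text := by
  have := pvSplitLoopA_eq text [] [] (by simp)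
  simpa using this

theorem pvSents_ne_nil (text : List Char) :
    ∀ s ∈ pvSplitSentencesB text, s ≠ [] := by
  intro s hs
  simp only [pvSplitSentencesB] at hs
  split at hs
  · rcases List.mem_append.1 hs with hm | hm
    · obtain ⟨p, -, rfl⟩ := List.mem_map.1 hm
      exact pvStrip_concat_dot_ne_nil p
    · simp only [List.mem_singleton] at hm
      subst hm; assumption
  · obtain ⟨p, -, rfl⟩ := List.mem_map.1 hs
    exact pvStrip_concat_dot_ne_nil p

-- tail of the greedy loop, closed form
def pvTail (limit : Int) : Int → List (List Char) → List (List Char)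
  | _, [] => []
  | len, s :: rest =>
      if len + ((s.length : Int) + 1) > limit then []
      else (' ' :: s) :: pvTail limit (len + ((s.length : Int) + 1)) rest

theorem pvGreedyA_acc (limit : Int) : ∀ (rest : List (List Char)) (parts : List (List Char)) (len : Int),
    parts ≠ [] → pvGreedyA limit parts len rest = parts ++ pvTail limit len rest := by
  intro rest
  induction rest with
  | nil => intro parts len _; simp [pvGreedyA, pvTail]
  | cons s rest ih =>
    intro parts len hp
    rw [pvGreedyA, pvTail]
    have hpe : parts.isEmpty = false := by simpa [List.isEmpty_iff] using hp
    simp only [hpe, Bool.false_eq_true, if_neg, not_false_iff, List.length_cons]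
    push_cast
    split
    · simp
    · rw [ih (parts ++ [' ' :: s]) (len + ((s.length : Int) + 1)) (by simp)]
      simp

theorem pvCumsB_lt : ∀ (rest : List (List Char)) (total : Int), ∀ c ∈ pvCumsB total false rest, total < c := by
  intro rest
  induction rest with
  | nil => intro total c hc; simp [pvCumsB] at hc
  | cons s rest ih =>
    intro total c hc
    simp only [pvCumsB, if_neg, Bool.false_eq_true, not_false_iff, List.mem_cons] at hc
    rcases hc with rfl | hc
    · have : (0 : Int) ≤ (s.length : Int) := Int.natCast_nonneg _
      omega
    · have h1 := ih (total + (s.length : Int) + 1) c (by simpa using hc)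
      have : (0 : Int) ≤ (s.length : Int) := Int.natCast_nonneg _
      omega

theorem pvTail_eq (limit : Int) : ∀ (rest : List (List Char)) (total : Int),
    pvTail limit total rest =
      (rest.take (List.countP (fun c => decide (c ≤ limit)) (pvCumsB total false rest))).map (' ' :: ·) := by
  intro rest
  induction rest with
  | nil => intro total; simp [pvTail, pvCumsB]
  | cons s rest ih =>
    intro total
    rw [pvTail, pvCumsB]
    simp only [Bool.false_eq_true, if_neg, not_false_iff, List.countP_cons]
    set t := total + (s.length : Int) + 1 with ht
    by_cases hgt : total + ((s.length : Int) + 1) > limit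
    · rw [if_pos hgt]
      have hfalse : decide (t ≤ limit) = false := by simp [ht]; omega
      have hzero : List.countP (fun c => decide (c ≤ limit)) (pvCumsB t false rest) = 0 := by
        rw [List.countP_eq_zero]
        intro c hc
        have := pvCumsB_lt rest t c hc
        simp; omega
      simp [hfalse, hzero]
    · rw [if_neg hgt]
      have htrue : decide (t ≤ limit) = true := by simp [ht]; omega
      have harg : total + ((s.length : Int) + 1) = t := by omega
      rw [harg, ih t]
      simp [htrue]

theorem pvJoin_nil (l : List (List Char)) : PySem.Chars.join [] l = l.flatten := by
  induction l with
  | nil => exact PySem.Chars.join_nil []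
  | cons x l ih =>
    cases l with
    | nil => simp [PySem.Chars.join_singleton]
    | cons y l' => rw [PySem.Chars.join_cons_cons]; simp only [List.flatten_cons]; simp [ih]

theorem pvJoin_space (x : List Char) (l : List (List Char)) :
    PySem.Chars.join [' '] (x :: l) = x ++ (l.map (' ' :: ·)).flatten := by
  induction l generalizing x with
  | nil => simp [PySem.Chars.join_singleton]
  | cons y l ih => rw [PySem.Chars.join_cons_cons, ih y]; simp

-- ===== VERDICT (by name: the statement is the Claim_ definition above) =====
theorem summarize_for_social_spec : Claim_equal_summarize_for_social := by
  intro pc plat _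
  unfold Spec_summarize_for_social
  simp only [summarize_for_social, summarize_for_social_alt]
  rw [pvSplitA_eq_B]
  have hne := pvSents_ne_nil pc.toList
  set limit := pvCharLimits.getD plat 280 with hl
  generalize hS : pvSplitSentencesB pc.toList = S
  rw [hS] at hne
  clear hS hl
  cases S with
  | nil => simp [pvGreedyA, pvCumsB, PySem.Chars.join_nil]
  | cons s0 rest =>
    have hs0 : s0 ≠ [] := hne s0 (by simp)
    rw [pvGreedyA, pvCumsB]
    simp only [List.isEmpty_nil, if_pos]
    by_cases hfit : (0 : Int) + (s0.length : Int) > limit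
    · -- even the first sentence does not fit: both take the truncation fallback
      rw [if_pos hfit]
      have hcond : List.countP (fun c => decide (c ≤ limit))
          ((0 + (s0.length : Int) + 0) :: pvCumsB (0 + (s0.length : Int) + 0) false rest) = 0 := by
        simp only [List.countP_cons]
        simp only [Nat.add_eq_zero_iff, List.countP_eq_zero]
        refine ⟨fun a ha => ?_, ?_⟩
        · have := pvCumsB_lt rest _ a ha
          simp; omega
        · simp; omega
      rw [hcond]
      rw [if_pos (⟨PySem.Chars.join_nil [], by simp⟩ :
        PySem.Chars.join [] ([] : List (List Char)) = [] ∧ (s0 :: rest : List (List Char)) ≠ [])]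
      rw [if_pos (⟨rfl, by simp⟩ : (0 : Nat) = 0 ∧ (s0 :: rest : List (List Char)) ≠ [])]
    · rw [if_neg hfit]
      simp only [List.nil_append]
      have harg : (0 : Int) + (s0.length : Int) + 0 = (s0.length : Int) := by ring
      have hargA : (0 : Int) + (s0.length : Int) = (s0.length : Int) := by ring
      rw [harg, hargA]
      rw [pvGreedyA_acc limit rest [s0] ((s0.length : Int)) (by simp)]
      rw [pvTail_eq limit rest ((s0.length : Int))]
      have hd0 : (decide (((s0.length : Int)) ≤ limit)) = true := by simp; omega
      have hcount : List.countP (fun c => decide (c ≤ limit))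
          (((s0.length : Int)) :: pvCumsB ((s0.length : Int)) false rest) =
          List.countP (fun c => decide (c ≤ limit)) (pvCumsB ((s0.length : Int)) false rest) + 1 := by
        simp only [List.countP_cons, hd0, if_true]
      rw [hcount]
      have hsum : PySem.Chars.join []
          ([s0] ++ (List.map (fun x => ' ' :: x)
            (List.take (List.countP (fun c => decide (c ≤ limit)) (pvCumsB ((s0.length : Int)) false rest)) rest))) =
          s0 ++ (List.map (fun x => ' ' :: x)
            (List.take (List.countP (fun c => decide (c ≤ limit)) (pvCumsB ((s0.length : Int)) false rest)) rest)).flatten := by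
        rw [pvJoin_nil]; simp
      rw [hsum]
      have hnn : s0 ++ (List.map (fun x => ' ' :: x)
          (List.take (List.countP (fun c => decide (c ≤ limit)) (pvCumsB ((s0.length : Int)) false rest)) rest)).flatten ≠ [] := by
        simp [hs0]
      rw [if_neg (fun hx => hnn hx.1)]
      rw [if_neg (by simp : ¬(List.countP (fun c => decide (c ≤ limit)) (pvCumsB ((s0.length : Int)) false rest) + 1 = 0 ∧ (s0 :: rest : List (List Char)) ≠ []))]
      rw [List.take_succ_cons, pvJoin_space]
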